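-- pv_equiv track=rewrite | github.com/jalanb/bashrc | src/python/site/lists.py | doublets
-- ===== SOURCE A (Python) =====
-- def doublets(items):
--     """[prev, curr] for each element of the list
--
--     >>> doublets([0, 1, 2])
--     [[None, 0], [0, 1], [1, 2]]
--     """
--     if not items:
--         return []
--     results = []
--     one = None
--     for two in items[0:]:
--         results.append([one, two])
--         one = two
--     return results
-- ===== SOURCE B (Python) =====
-- def doublets(items):
--     """[prev, curr] for each element, built back-to-front: destructively pop
--     elements off the end of a working copy, emit each pair in reverse order,
--     and reverse the output once at the end."""
--     xs = list(items)
--     out = []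
--     while xs:
--         curr = xs.pop()
--         prev = xs[-1] if xs else None
--         out.append([prev, curr])
--     out.reverse()
--     return out
-- ===== Notes on version B (the rewrite author's own statement) =====
-- stated objective: alternative
-- what changed: Instead of a forward pass threading the previous element in a mutable variable, B consumes a working copy back-to-front with pop(), reading each element's predecessor from the shrinking list's tail, collecting the pairs in reverse and reversing the output once at the end.
import Mathlib
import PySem

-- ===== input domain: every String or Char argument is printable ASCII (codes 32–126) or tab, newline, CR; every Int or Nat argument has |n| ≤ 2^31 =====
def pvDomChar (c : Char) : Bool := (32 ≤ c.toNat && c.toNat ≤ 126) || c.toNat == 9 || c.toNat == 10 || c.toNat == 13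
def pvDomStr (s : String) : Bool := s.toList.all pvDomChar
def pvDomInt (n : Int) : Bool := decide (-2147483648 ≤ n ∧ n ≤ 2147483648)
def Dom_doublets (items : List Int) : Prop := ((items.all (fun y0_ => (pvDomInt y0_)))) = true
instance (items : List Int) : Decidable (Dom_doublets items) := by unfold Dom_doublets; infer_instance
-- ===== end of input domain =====

-- B builds the [prev, curr] pairs back-to-front by popping elements off the end of a
-- working copy and reversing the collected pairs once at the end; return-value
-- equivalence only (A mutates nothing, B mutates only its private copy).
-- ===== PORT A =====
-- A: if not items: return []; then a forward loop over items[0:] threading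
-- (results, one); ported as a foldl over the same state pair.
def doublets (items : List Int) : List (List (Option Int)) :=
  if items = [] then []
  else
    (items.foldl
      (fun (st : List (List (Option Int)) × Option Int) two =>
        (st.1 ++ [[st.2, some two]], some two))
      ([], none)).1

-- ===== PORT B =====
-- B's while loop: 'curr = xs.pop()' on a nonempty xs is its last element (getLast?)
-- with the list shrinking to dropLast; 'xs[-1] if xs else None' is getLast? of the
-- shrunk list; out.append is ++ [pair].
def doubletsLoop (xs : List Int) (out : List (List (Option Int))) :
    List (List (Option Int)) :=
  if _h : xs = [] then out
  else doubletsLoop xs.dropLast (out ++ [[xs.dropLast.getLast?, xs.getLast?]])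
termination_by xs.length
decreasing_by
  simp only [List.length_dropLast]
  have := List.length_pos_of_ne_nil _h
  omega

-- B: run the back-to-front loop from an empty out, then out.reverse().
def doublets_alt (items : List Int) : List (List (Option Int)) :=
  (doubletsLoop items []).reverse

-- ===== PRECONDITION & SPEC =====
def Spec_doublets (items : List Int) (out : List (List (Option Int))) : Prop := out = doublets_alt items
instance (items : List Int) (out : List (List (Option Int))) : Decidable (Spec_doublets items out) := by unfold Spec_doublets; infer_instance

-- ===== CLAIM (what is proved, stated in full; the proofs are below) =====
def Claim_equal_doublets : Prop := ∀ (items : List Int), Dom_doublets items → Spec_doublets items (doublets items)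

-- ===== LEMMAS AND PROOFS =====
-- A's result is the first component of the fold even for [] (both are []).
lemma doublets_eq_fold (xs : List Int) :
    doublets xs
      = (xs.foldl
          (fun (st : List (List (Option Int)) × Option Int) two =>
            (st.1 ++ [[st.2, some two]], some two))
          ([], none)).1 := by
  cases xs <;> simp [doublets]

-- the threaded 'one' after folding xs from none is xs.getLast?
lemma fold_snd (xs : List Int) :
    (xs.foldl
      (fun (st : List (List (Option Int)) × Option Int) two =>
        (st.1 ++ [[st.2, some two]], some two))
      ([], none)).2 = xs.getLast? := by
  induction xs using List.reverseRecOn with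
  | nil => simp
  | append_singleton xs a ih => simp [List.foldl_append]

-- A's snoc recurrence
lemma doublets_snoc (xs : List Int) (a : Int) :
    doublets (xs ++ [a]) = doublets xs ++ [[xs.getLast?, some a]] := by
  rw [doublets_eq_fold, List.foldl_append]
  simp [← doublets_eq_fold, fold_snd]

-- the back-to-front loop produces A's pairs in reverse, appended to out
lemma doubletsLoop_eq (xs : List Int) :
    ∀ out, doubletsLoop xs out = out ++ (doublets xs).reverse := by
  induction xs using List.reverseRecOn with
  | nil => intro out; simp [doubletsLoop, doublets]
  | append_singleton xs a ih =>
      intro out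
      rw [doubletsLoop]
      simp only [List.dropLast_concat, List.getLast?_concat,
        dif_neg (List.append_ne_nil_of_right_ne_nil xs (List.cons_ne_nil a []))]
      rw [ih, doublets_snoc]
      simp

-- ===== VERDICT (by name: the statement is the Claim_ definition above) =====
theorem doublets_spec : Claim_equal_doublets := by
  intro items _
  unfold Spec_doublets doublets_alt
  rw [doubletsLoop_eq]
  simp
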